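-- pv_equiv track=rewrite | github.com/JustinSalsbery/go_call_graph | main.py | __is_escaped
-- ===== SOURCE A (Python) =====
-- def __is_escaped(string: str, end: str) -> bool:
--     count = 0
--
--     length = len(string) - len(end)
--     for i in range(length, 0, -1):
--         if string[i - 1] == "\\":
--             count += 1
--             continue
--         break
--
--     return (count % 2) == 1  # Escaped if an odd number of \.
-- ===== SOURCE B (Python) =====
-- def __is_escaped(string: str, end: str) -> bool:
--     # Forward state machine: scan the prefix once, toggling the escape flag
--     # on each backslash and resetting it on any other character.
--     escaped = False
--     for ch in string[:max(len(string) - len(end), 0)]: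
--         escaped = not escaped if ch == "\\" else False
--     return escaped
-- ===== Notes on version B (the rewrite author's own statement) =====
-- stated objective: alternative
-- what changed: A counts trailing backslashes by scanning backward from the suffix boundary and tests parity; B scans the prefix forward once with a boolean escape-state machine (toggle on backslash, reset otherwise), maintaining parity directly instead of a count.
import Mathlib
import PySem

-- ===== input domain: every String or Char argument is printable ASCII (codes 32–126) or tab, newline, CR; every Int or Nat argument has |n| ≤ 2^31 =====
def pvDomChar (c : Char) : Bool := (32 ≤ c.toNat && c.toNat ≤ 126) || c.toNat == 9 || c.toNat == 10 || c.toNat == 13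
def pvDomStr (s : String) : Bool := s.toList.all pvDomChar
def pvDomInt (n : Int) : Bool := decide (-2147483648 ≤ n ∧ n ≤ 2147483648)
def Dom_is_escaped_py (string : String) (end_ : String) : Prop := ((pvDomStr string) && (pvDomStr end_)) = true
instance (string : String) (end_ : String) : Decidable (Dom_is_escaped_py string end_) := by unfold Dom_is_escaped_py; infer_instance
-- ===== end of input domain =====

-- B replaces A's backward trailing-backslash count+parity by a forward one-pass boolean state machine over the prefix (alternative decomposition, same cost).
-- ===== PORT A =====
-- the backward for-loop with break, as structural recursion on the loop index i (count accumulates)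
def pvAGo (cs : List Char) (count : Nat) : Nat → Nat
  | 0 => count
  | Nat.succ k => if cs.getD k ' ' == '\\' then pvAGo cs (count + 1) k else count

def is_escaped_py (string : String) (end_ : String) : Bool :=
  let cs := string.toList
  let length : Int := (cs.length : Int) - (end_.toList.length : Int)
  let count := pvAGo cs 0 length.toNat
  (count % 2) == 1

-- ===== PORT B =====
-- forward fold over string[:max(len(string)-len(end),0)] with the escape flag as accumulator
def is_escaped_py_alt (string : String) (end_ : String) : Bool :=
  let length : Int := max ((string.toList.length : Int) - (end_.toList.length : Int)) 0
  (string.toList.take length.toNat).foldl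
    (fun escaped ch => if ch == '\\' then !escaped else false) false

-- ===== PRECONDITION & SPEC =====
def Spec_is_escaped_py (string : String) (end_ : String) (out : Bool) : Prop := out = is_escaped_py_alt string end_
instance (string : String) (end_ : String) (out : Bool) : Decidable (Spec_is_escaped_py string end_ out) := by unfold Spec_is_escaped_py; infer_instance

-- ===== CLAIM (what is proved, stated in full; the proofs are below) =====
def Claim_equal_is_escaped_py : Prop := ∀ (string : String) (end_ : String), Dom_is_escaped_py string end_ → Spec_is_escaped_py string end_ (is_escaped_py string end_)

-- ===== LEMMAS AND PROOFS =====
-- A's backward loop computes the number of trailing backslashes of the first n characters.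
theorem pvAGo_eq (cs : List Char) (c n : Nat) (hn : n ≤ cs.length) :
    pvAGo cs c n = c + ((cs.take n).reverse.takeWhile (· == '\\')).length := by
  induction n generalizing c with
  | zero => simp [pvAGo]
  | succ k ih =>
    have hk : k < cs.length := hn
    have hget : cs.getD k ' ' = cs[k] := List.getD_eq_getElem cs ' ' hk
    have htake : (cs.take (k + 1)).reverse = cs[k] :: (cs.take k).reverse := by
      rw [List.take_add_one, List.getElem?_eq_getElem hk]
      simp
    rw [pvAGo, hget, htake]
    by_cases hb : cs[k] = '\\'
    · simp only [hb, beq_self_eq_true, if_true, List.takeWhile_cons, List.length_cons]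
      rw [ih c.succ (Nat.le_of_lt hk)]
      omega
    · simp [hb]

-- B's forward state machine computes the parity of the trailing-backslash count.
theorem foldB_eq (l : List Char) :
    l.foldl (fun escaped ch => if ch == '\\' then !escaped else false) false
      = ((l.reverse.takeWhile (· == '\\')).length % 2 == 1) := by
  induction l using List.reverseRecOn with
  | nil => simp
  | append_singleton l a ih =>
    rw [List.foldl_append, ih]
    by_cases hb : a = '\\'
    · simp only [hb, List.reverse_append, List.reverse_singleton, List.singleton_append,
        List.takeWhile_cons, beq_self_eq_true, if_true, List.foldl_cons, List.foldl_nil,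
        List.length_cons]
      set k := (l.reverse.takeWhile (· == '\\')).length with hk
      by_cases h : k % 2 = 1
      · have h1 : (k + 1) % 2 = 0 := by omega
        simp [h, h1]
      · have h0 : k % 2 = 0 := by omega
        have h1 : (k + 1) % 2 = 1 := by omega
        simp [h, h1]
    · simp [hb]

theorem is_escaped_py_spec : Claim_equal_is_escaped_py := by
  intro string end_ _
  unfold Spec_is_escaped_py is_escaped_py is_escaped_py_alt
  simp only []
  set cs := string.toList with hcs
  set d : Int := (cs.length : Int) - (end_.toList.length : Int) with hd
  have hmax : (max d 0).toNat = d.toNat := by omega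
  rw [hmax, foldB_eq]
  have hbound : d.toNat ≤ cs.length := by omega
  rw [pvAGo_eq cs 0 d.toNat hbound]
  simp
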